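-- pv_equiv track=rewrite | github.com/hanaoverride/solutions-for-coding-test | greedy/development.py | solution
-- ===== SOURCE A (Python) =====
-- from math import ceil
--
-- def solution(progresses, speeds):
--     # 정답 배열에는 최대값이 갱신되기 전까지의 값의 갯수를 구한다.
--     answer = []
--     # 각 필요한 기간을 배열로 선정
--     mandate = [ceil((100 - progresses[i]) / speeds[i]) for i in range(len(progresses))]
--
--     # 초기 카운트값
--     count = 1
--     # 초기 최대값
--     cur_max = -1
--     # 악명높은 O(n) 탐색
--     for val in mandate:
--         # 최대값이 갱신되는 경우, 뒤의 작업은 앞의 작업보다 무조건 더 많이 걸릴것이다.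
--         # 따라서 최대값 이전에 작업중이던 모든 작업을 commit 한다.
--         if cur_max < val:
--             cur_max = val
--             answer.append(count)
--             count = 1
--         # 앞의 기간보다 짧게 끝나는 작업은 commit하지 않고 긴 작업이 끝날때까지 기다린다.
--         else:
--             count += 1
--     # 마지막 경우는 최대값을 갱신하지 않으므로 리스트에 append 한다.
--     answer.append(count)
--     # 첫 값의 경우는 -1 작업이 더미 작업이므로 제외하고 계산한다.
--     return answer[1:]
-- ===== SOURCE B (Python) =====
-- def batches(days):
--     # first batch: the maximal prefix whose later tasks finish no later than
--     # the batch's first task; recurse on the remainder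
--     if not days:
--         return []
--     rest = days[1:]
--     size = 1
--     while rest and rest[0] <= days[0]:
--         size += 1
--         rest = rest[1:]
--     return [size] + batches(rest)
--
-- def solution(progresses, speeds):
--     # remaining days via exact integer ceiling division
--     days = [-((p - 100) // s) for p, s in zip(progresses, speeds)]
--     return batches(days)
-- ===== Notes on version B (the rewrite author's own statement) =====
-- stated objective: alternative
-- what changed: A runs one stateful emit-on-new-max scan (count/cur_max seeded with a dummy -1, dummy group sliced off); B is a recursive splitter: each batch is the maximal prefix whose later tasks need no more days than the batch's first task, and it recurses on the remainder (days computed by exact integer ceiling division instead of float ceil).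
-- intended difference: On inputs whose first task already needs ceil((100-p0)/s0) <= -1 days (progress past 100 with positive speed, or negative speed), A's dummy cur_max=-1 swallows the first batch and under-reports (e.g. A returns [] for ([101],[1])), while B returns the actual batch sizes ([1]), which is the intended grouping. — e.g. on solution([101], [1]): A returns [], B returns [1]
import Mathlib
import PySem

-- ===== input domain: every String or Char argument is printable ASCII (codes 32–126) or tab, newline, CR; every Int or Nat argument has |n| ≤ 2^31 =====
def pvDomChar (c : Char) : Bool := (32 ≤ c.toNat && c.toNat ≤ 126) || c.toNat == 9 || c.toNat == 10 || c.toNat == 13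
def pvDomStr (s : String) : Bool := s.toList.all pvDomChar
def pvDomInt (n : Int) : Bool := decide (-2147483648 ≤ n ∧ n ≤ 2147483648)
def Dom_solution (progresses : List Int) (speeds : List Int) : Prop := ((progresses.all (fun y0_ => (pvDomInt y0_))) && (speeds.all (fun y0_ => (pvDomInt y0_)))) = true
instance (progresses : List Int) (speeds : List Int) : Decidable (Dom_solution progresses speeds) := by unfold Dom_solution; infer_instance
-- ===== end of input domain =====

-- B replaces A's stateful emit-on-new-max scan (seeded with a dummy cur_max = -1, dummy group
-- sliced off) by a recursive splitter that peels off the maximal prefix bounded by its own head;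
-- equal on Pre_ outside D_, where A's dummy miscounts the first batch.

-- ceil((100 - p) / s): A computes it with float ceil (exact on the integer domain for
-- |values| ≤ 2^31); both ports use this exact integer form
def cdays (p : Int) (s : Int) : Int := -(PySem.Int.floordiv (p - 100) s)

-- ===== PORT A =====
-- A's for-loop: state (answer, count, cur_max); appends count whenever the max is renewed, appends the last count at the end
def solutionLoop : List Int → List Int → Int → Int → List Int
  | [], answer, count, _ => answer ++ [count]
  | v :: vs, answer, count, curMax =>
    if curMax < v then solutionLoop vs (answer ++ [count]) 1 v
    else solutionLoop vs answer (count + 1) curMax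

def solution (progresses : List Int) (speeds : List Int) : List Int :=
  PySem.List.slice
    (solutionLoop
      ((PySem.List.pyRange 0 (progresses.length : Int) 1).map
        (fun i => cdays (PySem.List.pyGetD progresses i 0) (PySem.List.pyGetD speeds i 0)))
      [] 1 (-1))
    (some 1) none

-- ===== PORT B =====
-- Source B's while loop: consume rest while its head is ≤ the batch head, growing size
def batchLoop (head : Int) : List Int → Int → Int × List Int
  | [], size => (size, [])
  | r :: rs, size => if r ≤ head then batchLoop head rs (size + 1) else (size, r :: rs)

-- the leftover list never grows (for termination of batches)
theorem batchLoop_len (head : Int) : ∀ (vs : List Int) (size : Int),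
    (batchLoop head vs size).2.length ≤ vs.length := by
  intro vs
  induction vs with
  | nil => intro size; simp [batchLoop]
  | cons r rs ih =>
    intro size
    by_cases h : r ≤ head
    · simp only [batchLoop, if_pos h]
      exact le_trans (ih (size + 1)) (by simp)
    · simp [batchLoop, h]

-- Source B's batches: peel the maximal head-bounded prefix, recurse on the rest
def batches : List Int → List Int
  | [] => []
  | v :: vs =>
    let pr := batchLoop v vs 1
    pr.1 :: batches pr.2
termination_by l => l.length
decreasing_by
  have := batchLoop_len v vs 1
  simp only [List.length_cons]
  omega

def solution_alt (progresses : List Int) (speeds : List Int) : List Int :=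
  batches (List.zipWith (fun p s => cdays p s) progresses speeds)

-- ===== PRECONDITION & SPEC =====
-- Pre_ excludes exactly the inputs on which A raises: IndexError when speeds is shorter than
-- progresses, ZeroDivisionError when a used speed is 0.
def Pre_solution (progresses : List Int) (speeds : List Int) : Prop :=
  progresses.length ≤ speeds.length ∧ ∀ s ∈ speeds.take progresses.length, s ≠ 0

instance (progresses : List Int) (speeds : List Int) : Decidable (Pre_solution progresses speeds) := by
  unfold Pre_solution; infer_instance

def pvWitness_solution : List Int × List Int := ([93, 30, 55], [1, 30, 5])

-- On inputs whose first task already needs ceil((100-p0)/s0) ≤ -1 days (p0 ≥ 100+s0 with s0 > 0, or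
-- p0 ≤ 100+s0 with s0 < 0) A's dummy cur_max = -1 swallows the first batch and under-reports
-- (e.g. [] for ([101],[1])), while B returns the actual batch sizes ([1]), the intended grouping.
def D_solution (progresses : List Int) (speeds : List Int) : Prop :=
  progresses ≠ [] ∧ speeds ≠ [] ∧
    ((0 < speeds.headD 0 ∧ 100 + speeds.headD 0 ≤ progresses.headD 0) ∨
     (speeds.headD 0 < 0 ∧ progresses.headD 0 ≤ 100 + speeds.headD 0))

instance (progresses : List Int) (speeds : List Int) : Decidable (D_solution progresses speeds) := by
  unfold D_solution; infer_instance

def Spec_solution (progresses : List Int) (speeds : List Int) (out : List Int) : Prop :=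
  ¬ D_solution progresses speeds → out = solution_alt progresses speeds

instance (progresses : List Int) (speeds : List Int) (out : List Int) : Decidable (Spec_solution progresses speeds out) := by
  unfold Spec_solution; infer_instance

def pvDiffWitness_solution : List Int × List Int := ([101], [1])
def pvDiffWitnessOut_solution : (List Int) × (List Int) := ([], [1])

-- ===== CLAIM (what is proved, stated in full; the proofs are below) =====
def Claim_unchanged_solution : Prop := ∀ (progresses : List Int) (speeds : List Int), Dom_solution progresses speeds → Pre_solution progresses speeds → Spec_solution progresses speeds (solution progresses speeds)
def Claim_changed_solution : Prop := Dom_solution (pvDiffWitness_solution.1) (pvDiffWitness_solution.2) ∧ Pre_solution (pvDiffWitness_solution.1) (pvDiffWitness_solution.2) ∧ D_solution (pvDiffWitness_solution.1) (pvDiffWitness_solution.2) ∧ solution (pvDiffWitness_solution.1) (pvDiffWitness_solution.2) = pvDiffWitnessOut_solution.1 ∧ solution_alt (pvDiffWitness_solution.1) (pvDiffWitness_solution.2) = pvDiffWitnessOut_solution.2 ∧ pvDiffWitnessOut_solution.1 ≠ pvDiffWitnessOut_solution.2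
def Claim_exact_solution : Prop := ∀ (progresses : List Int) (speeds : List Int), Dom_solution progresses speeds → Pre_solution progresses speeds → D_solution progresses speeds → solution progresses speeds ≠ solution_alt progresses speeds

-- ===== LEMMAS AND PROOFS =====

-- batch counts emitted by A's scan from state (cur_max, count), final count included
def counts : List Int → Int → Int → List Int
  | [], _, c => [c]
  | v :: vs, m, c => if m < v then c :: counts vs v 1 else counts vs m (c + 1)

theorem solutionLoop_eq_counts (vs : List Int) : ∀ (acc : List Int) (c m : Int),
    solutionLoop vs acc c m = acc ++ counts vs m c := by
  induction vs with
  | nil => intro acc c m; simp [solutionLoop, counts]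
  | cons v vs ih =>
    intro acc c m
    by_cases h : m < v
    · simp [solutionLoop, counts, h, ih]
    · simp [solutionLoop, counts, h, ih]

-- B's splitter agrees with A's scan once both start from the real first element
theorem batches_eq_counts (vs : List Int) : ∀ (m c : Int),
    (batchLoop m vs c).1 :: batches (batchLoop m vs c).2 = counts vs m c := by
  induction vs with
  | nil => intro m c; simp [batchLoop, counts, batches]
  | cons v vs ih =>
    intro m c
    by_cases h : m < v
    · have hv : ¬ v ≤ m := by omega
      simp only [batchLoop, if_neg hv, counts, if_pos h]
      rw [batches]
      exact congrArg (c :: ·) (ih v 1)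
    · have hv : v ≤ m := by omega
      simp only [batchLoop, if_pos hv, counts, if_neg h]
      exact ih m (c + 1)

theorem map_range_zipWith (f : Int → Int → Int) (xs ys : List Int) (h : xs.length ≤ ys.length) :
    (PySem.List.pyRange 0 (xs.length : Int) 1).map
      (fun i => f (PySem.List.pyGetD xs i 0) (PySem.List.pyGetD ys i 0)) = List.zipWith f xs ys := by
  apply List.ext_getElem
  · simp [PySem.List.length_pyRange_one]; omega
  · intro i h1 h2
    have hi : i < xs.length := by
      simpa [PySem.List.length_pyRange_one] using h1
    simp only [List.getElem_map, List.getElem_zipWith]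
    rw [PySem.List.getElem_pyRange_one]
    simp only [zero_add]
    rw [PySem.List.pyGetD_eq_getElem xs 0 (by positivity) (by exact_mod_cast hi),
        PySem.List.pyGetD_eq_getElem ys 0 (by positivity) (by exact_mod_cast (lt_of_lt_of_le hi h))]
    simp

theorem cdays_gt_neg_one (p s : Int) (hs : s ≠ 0)
    (h : ¬((0 < s ∧ 100 + s ≤ p) ∨ (s < 0 ∧ p ≤ 100 + s))) :
    -1 < cdays p s := by
  unfold cdays
  rcases lt_or_gt_of_ne hs with hneg | hpos
  · have hp : 100 + s < p := by
      by_contra hc; push Not at hc; exact h (Or.inr ⟨hneg, hc⟩)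
    rw [show p - 100 = -(-(p - 100)) by ring, show s = -(-s) by ring,
        PySem.Int.floordiv_neg_neg]
    have h1 : PySem.Int.floordiv (-(p - 100)) (-s) < 1 := by
      rw [PySem.Int.floordiv_lt_iff_lt_mul (by omega : (0:Int) < -s)]
      omega
    omega
  · have hp : p < 100 + s := by
      by_contra hc; push Not at hc; exact h (Or.inl ⟨hpos, hc⟩)
    have h1 : PySem.Int.floordiv (p - 100) s < 1 := by
      rw [PySem.Int.floordiv_lt_iff_lt_mul hpos]
      omega
    omega

theorem cdays_le_neg_one (p s : Int)
    (h : (0 < s ∧ 100 + s ≤ p) ∨ (s < 0 ∧ p ≤ 100 + s)) :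
    cdays p s ≤ -1 := by
  unfold cdays
  rcases h with ⟨hpos, hp⟩ | ⟨hneg, hp⟩
  · have h1 : 1 ≤ PySem.Int.floordiv (p - 100) s := by
      rw [PySem.Int.le_floordiv_iff_mul_le hpos]
      omega
    omega
  · rw [show p - 100 = -(-(p - 100)) by ring, show s = -(-s) by ring,
        PySem.Int.floordiv_neg_neg]
    have h1 : 1 ≤ PySem.Int.floordiv (-(p - 100)) (-s) := by
      rw [PySem.Int.le_floordiv_iff_mul_le (by omega : (0:Int) < -s)]
      omega
    omega

theorem counts_sum (vs : List Int) : ∀ (m c : Int), (counts vs m c).sum = c + (vs.length : Int) := by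
  induction vs with
  | nil => intro m c; simp [counts]
  | cons v vs ih =>
    intro m c
    by_cases h : m < v
    · simp [counts, h, ih]; ring
    · simp [counts, h, ih]; ring

theorem counts_shape (vs : List Int) : ∀ (m c : Int),
    ∃ h t, counts vs m c = h :: t ∧ c ≤ h := by
  induction vs with
  | nil => intro m c; exact ⟨c, [], rfl, le_refl c⟩
  | cons v vs ih =>
    intro m c
    by_cases hv : m < v
    · exact ⟨c, counts vs v 1, by simp [counts, hv], le_refl c⟩
    · obtain ⟨h, t, he, hc⟩ := ih m (c + 1)
      exact ⟨h, t, by simp [counts, hv, he], by omega⟩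

theorem solution_eq_counts (progresses speeds : List Int) (h : progresses.length ≤ speeds.length) :
    solution progresses speeds =
      (counts (List.zipWith (fun p s => cdays p s) progresses speeds) (-1) 1).tail := by
  simp only [solution]
  rw [map_range_zipWith _ _ _ h, solutionLoop_eq_counts, PySem.List.slice_from_one]
  simp

theorem alt_nil (progresses speeds : List Int)
    (h : List.zipWith (fun p s => cdays p s) progresses speeds = []) :
    solution_alt progresses speeds = [] := by
  simp only [solution_alt]
  rw [h, batches]

theorem alt_cons (progresses speeds : List Int) (v : Int) (vs : List Int)
    (h : List.zipWith (fun p s => cdays p s) progresses speeds = v :: vs) :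
    solution_alt progresses speeds = counts vs v 1 := by
  simp only [solution_alt]
  rw [h, batches]
  exact batches_eq_counts vs v 1

-- ===== VERDICT (by name: the statement is the Claim_ definition above) =====
theorem solution_spec : Claim_unchanged_solution := by
  intro progresses speeds hdom hpre hnd
  obtain ⟨hlen, hnz⟩ := hpre
  cases progresses with
  | nil =>
    rw [alt_nil _ _ (by simp), solution_eq_counts _ _ (by simp)]
    simp [counts]
  | cons p0 ps =>
    cases speeds with
    | nil => simp at hlen
    | cons s0 ss =>
      have hs0 : s0 ≠ 0 := hnz s0 (by simp)
      have hD : ¬((0 < s0 ∧ 100 + s0 ≤ p0) ∨ (s0 < 0 ∧ p0 ≤ 100 + s0)) := by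
        intro hc
        exact hnd ⟨by simp, by simp, by simpa using hc⟩
      have hv : -1 < cdays p0 s0 := cdays_gt_neg_one p0 s0 hs0 hD
      rw [solution_eq_counts _ _ hlen, alt_cons _ _ (cdays p0 s0) _ rfl]
      simp [counts, hv]

theorem solution_changed : Claim_changed_solution := by
  unfold Claim_changed_solution
  refine ⟨by decide, by decide, by decide, by decide, ?_, by decide⟩
  rw [show pvDiffWitness_solution.1 = [(101 : Int)] from rfl,
      show pvDiffWitness_solution.2 = [(1 : Int)] from rfl,
      alt_cons [101] [1] (-1) [] (by decide)]
  decide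

theorem solution_tight : Claim_exact_solution := by
  intro progresses speeds hdom hpre hD heq
  obtain ⟨hlen, hnz⟩ := hpre
  obtain ⟨hp, hs, hsign⟩ := hD
  cases progresses with
  | nil => exact hp rfl
  | cons p0 ps =>
    cases speeds with
    | nil => exact hs rfl
    | cons s0 ss =>
      simp only [List.headD_cons] at hsign
      have hv : cdays p0 s0 ≤ -1 := cdays_le_neg_one p0 s0 hsign
      rw [solution_eq_counts _ _ hlen, alt_cons _ _ (cdays p0 s0) _ rfl] at heq
      simp only [List.zipWith_cons_cons] at heq
      have hnv : ¬((-1 : Int) < cdays p0 s0) := by omega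
      rw [show counts (cdays p0 s0 :: List.zipWith (fun p s => cdays p s) ps ss) (-1) 1
            = counts (List.zipWith (fun p s => cdays p s) ps ss) (-1) 2 from by
        simp [counts, hnv]] at heq
      obtain ⟨h, t, hct, hh⟩ := counts_shape (List.zipWith (fun p s => cdays p s) ps ss) (-1) 2
      rw [hct] at heq
      simp only [List.tail_cons] at heq
      have hsum1 := counts_sum (List.zipWith (fun p s => cdays p s) ps ss) (-1) 2
      rw [hct] at hsum1
      simp only [List.sum_cons] at hsum1
      have hsum2 := counts_sum (List.zipWith (fun p s => cdays p s) ps ss) (cdays p0 s0) 1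
      rw [← heq] at hsum2
      omega
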